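-- pv_equiv track=rewrite | github.com/Leyandre/Metro_project | Projet Métro.py | find_line
-- ===== SOURCE A (Python) =====
-- def find_line(n_station, dic_station, ligne):
--
--     if n_station in ligne:
--         return ligne
--
--     ligne += [n_station]
--
--     for connexion in dic_station[n_station][1]:
--
--         if dic_station[connexion][0] != dic_station[n_station][0]:
--             ligne = find_line(connexion, dic_station, ligne)
--
--     return ligne
-- ===== SOURCE B (Python) =====
-- def find_line(n_station, dic_station, ligne):
--     seen = set(ligne)
--     order = []
--     stack = [n_station]
--     while stack:
--         node = stack.pop()
--         if node in seen:
--             continue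
--         seen.add(node)
--         order.append(node)
--         line = dic_station[node][0]
--         for connexion in reversed(dic_station[node][1]):
--             if dic_station[connexion][0] != line:
--                 stack.append(connexion)
--     ligne += order
--     return ligne
-- ===== Notes on version B (the rewrite author's own statement) =====
-- stated objective: alternative
-- what changed: A's recursive DFS that threads ligne through nested calls is replaced by an iterative worklist: an explicit LIFO stack, a separate visited set seeded from ligne, and an order list of newly visited stations appended to ligne once at the end (neighbors pushed in reverse so the preorder is identical).
-- outside the precondition, e.g. on find_line(0, {0: ('A', []), 1: ('A', [5])}, []): A returns [0], B returns [0]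
import Mathlib
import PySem

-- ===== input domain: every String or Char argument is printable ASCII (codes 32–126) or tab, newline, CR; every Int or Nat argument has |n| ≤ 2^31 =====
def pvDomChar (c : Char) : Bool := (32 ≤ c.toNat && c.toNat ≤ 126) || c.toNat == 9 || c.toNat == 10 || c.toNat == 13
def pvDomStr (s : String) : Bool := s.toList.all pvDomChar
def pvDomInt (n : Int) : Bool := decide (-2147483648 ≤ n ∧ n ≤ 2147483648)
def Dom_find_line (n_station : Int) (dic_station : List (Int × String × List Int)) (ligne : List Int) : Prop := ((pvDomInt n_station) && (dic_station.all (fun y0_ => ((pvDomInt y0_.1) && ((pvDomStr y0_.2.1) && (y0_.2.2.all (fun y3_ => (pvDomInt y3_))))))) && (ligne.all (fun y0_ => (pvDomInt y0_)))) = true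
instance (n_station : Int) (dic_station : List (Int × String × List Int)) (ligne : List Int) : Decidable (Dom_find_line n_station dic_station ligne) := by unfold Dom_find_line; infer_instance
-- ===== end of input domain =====

-- B replaces A's recursive DFS (which threads `ligne` through nested calls) by an iterative
-- worklist: an explicit LIFO stack, a separate visited set seeded from `ligne`, and an order
-- list of newly visited stations appended to `ligne` once at the end; same preorder, and
-- both mutate the passed-in `ligne` identically, so the RETURN-value equivalence proved here
-- covers the observable behaviour.

-- ===== PORT A =====
-- dict lookup: first matching key of the association list (none = KeyError)
def pvLk (d : List (Int × String × List Int)) (k : Int) : Option (String × List Int) :=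
  (d.find? (fun e => e.1 == k)).map (fun e => e.2)

-- recursive DFS of A; `fuel` is only a totality guard (one unit per appended station,
-- `d.length + 2` never runs out on inputs satisfying Pre_find_line)
def pvGoA (d : List (Int × String × List Int)) (fuel : Nat) (n : Int) (lg : List Int) : List Int :=
  if n ∈ lg then lg
  else
    match fuel with
    | 0 => lg
    | f + 1 =>
      match pvLk d n with
      | none => lg  -- Python raises KeyError here; excluded by Pre_find_line
      | some v =>
        v.2.foldl
          (fun acc c =>
            if ((pvLk d c).getD ("", [])).1 ≠ v.1 then pvGoA d f c acc else acc)
          (lg ++ [n])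

def find_line (n_station : Int) (dic_station : List (Int × String × List Int)) (ligne : List Int) : List Int :=
  pvGoA dic_station (dic_station.length + 2) n_station ligne

-- ===== PORT B =====
-- B-side dict lookup, written as the first-match recursion (none = KeyError)
def pvFindB (d : List (Int × String × List Int)) (k : Int) : Option (String × List Int) :=
  match d with
  | [] => none
  | e :: rest => if e.1 = k then some e.2 else pvFindB rest k

-- iterative worklist of B: pop a node, skip if seen, else record it in `seen`/`ord` and push
-- its cross-line neighbors in reverse; `fuel` is only a totality guard (one unit per pop,
-- the chosen bound never runs out on inputs satisfying Pre_find_line)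
def pvStepB (d : List (Int × String × List Int)) (fuel : Nat) (stack : List Int)
    (seen : PySem.Set Int) (ord : List Int) : List Int :=
  match stack with
  | [] => ord
  | node :: rest =>
    match fuel with
    | 0 => ord
    | f + 1 =>
      if PySem.Set.contains seen node then pvStepB d f rest seen ord
      else
        match pvFindB d node with
        | none => pvStepB d f rest seen ord  -- Python raises KeyError here; excluded by Pre_find_line
        | some (line, conns) =>
          pvStepB d f
            (conns.reverse.foldl
              (fun st c =>
                if ((pvFindB d c).map Prod.fst).getD "" ≠ line then c :: st else st)
              rest)
            (PySem.Set.add seen node) (ord ++ [node])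

def find_line_alt (n_station : Int) (dic_station : List (Int × String × List Int)) (ligne : List Int) : List Int :=
  ligne ++
    pvStepB dic_station
      (1 + (dic_station.length + 1) * ((dic_station.map (fun e => e.2.2.length)).sum + 1))
      [n_station] (PySem.Set.ofList ligne) []

-- ===== PRECONDITION & SPEC =====
-- Pre_ excludes exactly the malformed-graph inputs: unless the start station is already in `ligne`
-- (A returns at once), the start must be a key and every listed connexion of every station a key;
-- whether Python's KeyError on a dangling connexion is actually reached is not closed-form, so
-- unreachable dangling connexions (on which A still returns) are excluded with the reachable ones.
def Pre_find_line (n_station : Int) (dic_station : List (Int × String × List Int)) (ligne : List Int) : Prop :=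
  n_station ∈ ligne ∨
    (n_station ∈ dic_station.map (fun e => e.1) ∧
      ∀ e ∈ dic_station, ∀ c ∈ e.2.2, c ∈ dic_station.map (fun e => e.1))
instance (n_station : Int) (dic_station : List (Int × String × List Int)) (ligne : List Int) : Decidable (Pre_find_line n_station dic_station ligne) := by unfold Pre_find_line; infer_instance

def pvWitness_find_line : Int × (List (Int × String × List Int)) × List Int :=
  (0, [(0, "A", [1]), (1, "B", [0, 2]), (2, "B", [1])], [])

def Spec_find_line (n_station : Int) (dic_station : List (Int × String × List Int)) (ligne : List Int) (out : List Int) : Prop := out = find_line_alt n_station dic_station ligne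
instance (n_station : Int) (dic_station : List (Int × String × List Int)) (ligne : List Int) (out : List Int) : Decidable (Spec_find_line n_station dic_station ligne out) := by unfold Spec_find_line; infer_instance

-- ===== CLAIM (what is proved, stated in full; the proofs are below) =====
def Claim_equal_find_line : Prop := ∀ (n_station : Int) (dic_station : List (Int × String × List Int)) (ligne : List Int), Dom_find_line n_station dic_station ligne → Pre_find_line n_station dic_station ligne → Spec_find_line n_station dic_station ligne (find_line n_station dic_station ligne)

-- ===== LEMMAS AND PROOFS =====

-- proof-internal reference machine: the one-list iterative DFS (visited test and output on the
-- same list); B is proved equal to it, and it is proved equal to A's recursion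
def pvGoM (d : List (Int × String × List Int)) (fuel : Nat) (stack lg : List Int) : List Int :=
  match stack with
  | [] => lg
  | n :: rest =>
    match fuel with
    | 0 => lg
    | f + 1 =>
      if n ∈ lg then pvGoM d f rest lg
      else
        match pvLk d n with
        | none => pvGoM d f rest lg
        | some v =>
          pvGoM d f
            (v.2.reverse.foldl
              (fun st c =>
                if ((pvLk d c).getD ("", [])).1 ≠ v.1 then c :: st else st)
              rest)
            (lg ++ [n])

-- number of keys of d not yet in lg
def pvNu (d : List (Int × String × List Int)) (lg : List Int) : Nat :=
  (d.map (fun e => e.1)).countP (fun k => !(decide (k ∈ lg)))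

lemma pvFindB_eq_pvLk (d : List (Int × String × List Int)) (k : Int) :
    pvFindB d k = pvLk d k := by
  induction d with
  | nil => rfl
  | cons e rest ih =>
    unfold pvFindB pvLk
    by_cases h : e.1 = k
    · simp [h]
    · simpa [List.find?_cons, h, pvLk] using ih

-- unfolding equations for the ports
lemma pvGoA_succ (d : List (Int × String × List Int)) (f : Nat) (n : Int) (lg : List Int) :
    pvGoA d (f + 1) n lg = if n ∈ lg then lg else
      match pvLk d n with
      | none => lg
      | some v =>
        v.2.foldl
          (fun acc c => if ((pvLk d c).getD ("", [])).1 ≠ v.1 then pvGoA d f c acc else acc)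
          (lg ++ [n]) := by
  rfl

lemma pvGoA_mem (d : List (Int × String × List Int)) (f : Nat) (n : Int) (lg : List Int)
    (hn : n ∈ lg) : pvGoA d f n lg = lg := by
  unfold pvGoA; rw [if_pos hn]

lemma pvGoM_nil (d : List (Int × String × List Int)) (f : Nat) (lg : List Int) :
    pvGoM d f [] lg = lg := by cases f <;> rfl

lemma pvGoM_succ (d : List (Int × String × List Int)) (f : Nat) (n : Int) (rest lg : List Int) :
    pvGoM d (f + 1) (n :: rest) lg = if n ∈ lg then pvGoM d f rest lg else
      match pvLk d n with
      | none => pvGoM d f rest lg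
      | some v =>
        pvGoM d f
          (v.2.reverse.foldl
            (fun st c => if ((pvLk d c).getD ("", [])).1 ≠ v.1 then c :: st else st) rest)
          (lg ++ [n]) := by
  rfl

-- B's machine simulates the reference machine: `seen` tracks exactly the membership of the
-- reference list, and the output is the prefix `pre` plus the recorded order
lemma pvStepB_eq_pvGoM (d : List (Int × String × List Int)) :
    ∀ (f : Nat) (stack seen pre ord : List Int),
      (∀ x : Int, x ∈ seen ↔ x ∈ pre ++ ord) →
      pre ++ pvStepB d f stack seen ord = pvGoM d f stack (pre ++ ord) := by
  intro f
  induction f with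
  | zero =>
    intro stack seen pre ord _
    match stack with
    | [] => rfl
    | n :: rest => rfl
  | succ f ih =>
    intro stack seen pre ord hseen
    match stack with
    | [] => rfl
    | n :: rest =>
      rw [pvGoM_succ]
      unfold pvStepB
      have hcont : PySem.Set.contains seen n = decide (n ∈ pre ++ ord) := by
        rw [PySem.Set.contains_eq_decide]
        simp [hseen n]
      by_cases hmem : n ∈ pre ++ ord
      · rw [if_pos hmem]
        simp only [hcont, hmem, decide_true, if_true]
        exact ih rest seen pre ord hseen
      · rw [if_neg hmem]
        simp only [hcont, hmem, decide_false]
        rw [pvFindB_eq_pvLk]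
        match hv : pvLk d n with
        | none => exact ih rest seen pre ord hseen
        | some (line, conns) =>
          dsimp only
          have hstk :
              conns.reverse.foldl
                (fun st c => if ((pvFindB d c).map Prod.fst).getD "" ≠ line then c :: st else st)
                rest
              = conns.reverse.foldl
                (fun st c => if ((pvLk d c).getD ("", [])).1 ≠ line then c :: st else st)
                rest := by
            have hfun : (fun (st : List Int) (c : Int) =>
                if ((pvFindB d c).map Prod.fst).getD "" ≠ line then c :: st else st)
              = (fun (st : List Int) (c : Int) =>
                if ((pvLk d c).getD ("", [])).1 ≠ line then c :: st else st) := by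
              funext st c
              rw [pvFindB_eq_pvLk]
              cases pvLk d c <;> rfl
            rw [hfun]
          rw [hstk]
          have hseen' : ∀ x : Int, x ∈ PySem.Set.add seen n ↔ x ∈ pre ++ (ord ++ [n]) := by
            intro x
            rw [PySem.Set.mem_add]
            constructor
            · rintro (h | rfl)
              · rcases List.mem_append.mp ((hseen x).mp h) with h' | h' <;> simp [h']
              · simp
            · intro h
              rcases List.mem_append.mp h with h' | h'
              · exact Or.inl ((hseen x).mpr (List.mem_append.mpr (Or.inl h')))
              · rcases List.mem_append.mp h' with h'' | h''
                · exact Or.inl ((hseen x).mpr (List.mem_append.mpr (Or.inr h'')))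
                · exact Or.inr (List.mem_singleton.mp h'')
          have hrec := ih
            (conns.reverse.foldl
              (fun st c => if ((pvLk d c).getD ("", [])).1 ≠ line then c :: st else st) rest)
            (PySem.Set.add seen n) pre (ord ++ [n]) hseen'
          simp only [Bool.false_eq_true, if_false]
          rw [hrec, List.append_assoc]

lemma pvLk_some_mem {d : List (Int × String × List Int)} {n : Int} {v : String × List Int}
    (h : pvLk d n = some v) :
    n ∈ d.map (fun e => e.1) ∧ ∃ e ∈ d, e.2 = v := by
  unfold pvLk at h
  rcases Option.map_eq_some_iff.mp h with ⟨e, he, hv⟩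
  have hmem := List.mem_of_find?_eq_some he
  have hp := List.find?_some he
  simp only [beq_iff_eq] at hp
  subst hv
  exact ⟨hp ▸ List.mem_map_of_mem hmem, e, hmem, rfl⟩

lemma pvLk_mem_some {d : List (Int × String × List Int)} {n : Int}
    (h : n ∈ d.map (fun e => e.1)) : ∃ v, pvLk d n = some v := by
  rcases List.mem_map.mp h with ⟨e, he, rfl⟩
  have : (d.find? (fun e' => e'.1 == e.1)).isSome := by
    rw [List.find?_isSome]
    exact ⟨e, he, by simp⟩
  rcases Option.isSome_iff_exists.mp this with ⟨e', he'⟩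
  exact ⟨e'.2, by unfold pvLk; rw [he']; rfl⟩

lemma foldl_mem_mono {α β : Type} (g : List α → β → List α) {x : α}
    (h : ∀ acc c, x ∈ acc → x ∈ g acc c) :
    ∀ (cs : List β) (acc : List α), x ∈ acc → x ∈ cs.foldl g acc := by
  intro cs
  induction cs with
  | nil => intro acc hx; simpa using hx
  | cons c cs ih => intro acc hx; exact ih _ (h acc c hx)

lemma pvGoA_mono (d : List (Int × String × List Int)) :
    ∀ (f : Nat) (n : Int) (lg : List Int) (x : Int), x ∈ lg → x ∈ pvGoA d f n lg := by
  intro f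
  induction f with
  | zero => intro n lg x hx; unfold pvGoA; split <;> simp [hx]
  | succ f ih =>
    intro n lg x hx
    rw [pvGoA_succ]
    split
    · exact hx
    · match hv : pvLk d n with
      | none => exact hx
      | some v =>
        refine foldl_mem_mono _ ?_ _ _ (by simp [hx])
        intro acc c hmem
        split
        · exact ih c acc x hmem
        · exact hmem

lemma countP_lt {l : List Int} {p q : Int → Bool}
    (hpq : ∀ a, p a = true → q a = true) {n : Int}
    (hn : n ∈ l) (hq : q n = true) (hp : p n = false) :
    l.countP p < l.countP q := by
  induction l with
  | nil => cases hn
  | cons a l ih =>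
    have hmono : l.countP p ≤ l.countP q := List.countP_mono_left (fun a _ => hpq a)
    rcases List.mem_cons.mp hn with rfl | htail
    · simp [hp, hq]
      omega
    · have hlt := ih htail
      have h1 : (if p a = true then 1 else 0) ≤ (if q a = true then 1 else 0) := by
        by_cases hpa : p a = true
        · simp [hpa, hpq a hpa]
        · simp [hpa]
      simp only [List.countP_cons]
      omega

lemma pvNu_mono (d : List (Int × String × List Int)) {lg lg' : List Int}
    (h : ∀ x, x ∈ lg → x ∈ lg') : pvNu d lg' ≤ pvNu d lg := by
  unfold pvNu
  refine List.countP_mono_left ?_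
  intro a _ ha
  simp only [Bool.not_eq_eq_eq_not, Bool.not_true, decide_eq_false_iff_not] at ha ⊢
  exact fun hmem => ha (h a hmem)

lemma pvNu_strict (d : List (Int × String × List Int)) {lg : List Int} {n : Int}
    (hk : n ∈ d.map (fun e => e.1)) (hn : n ∉ lg) :
    pvNu d (lg ++ [n]) < pvNu d lg := by
  unfold pvNu
  refine countP_lt ?_ hk ?_ ?_
  · intro a ha
    simp only [Bool.not_eq_eq_eq_not, Bool.not_true, decide_eq_false_iff_not, List.mem_append] at ha ⊢
    exact fun hmem => ha (Or.inl hmem)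
  · simpa using hn
  · simp

lemma pvNu_le (d : List (Int × String × List Int)) (lg : List Int) :
    pvNu d lg ≤ d.length := by
  unfold pvNu
  calc (d.map (fun e => e.1)).countP (fun k => !(decide (k ∈ lg)))
      ≤ (d.map (fun e => e.1)).length := List.countP_le_length
    _ = d.length := by simp

-- fold congruence for A's inner loop: two fuels agree on every accumulator extending `base`
lemma foldl_goA_congr (d : List (Int × String × List Int)) (f g : Nat) (base : List Int)
    (v : String × List Int)
    (H : ∀ (c : Int) (a : List Int), (∀ x, x ∈ base → x ∈ a) → pvGoA d f c a = pvGoA d g c a) :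
    ∀ (cs : List Int) (acc : List Int), (∀ x, x ∈ base → x ∈ acc) →
      cs.foldl (fun acc c => if ((pvLk d c).getD ("", [])).1 ≠ v.1 then pvGoA d f c acc else acc) acc
        = cs.foldl (fun acc c => if ((pvLk d c).getD ("", [])).1 ≠ v.1 then pvGoA d g c acc else acc) acc := by
  intro cs
  induction cs with
  | nil => intro acc _; rfl
  | cons c cs ih =>
    intro acc hacc
    simp only [List.foldl_cons]
    by_cases hc : ((pvLk d c).getD ("", [])).1 ≠ v.1
    · rw [if_pos hc, if_pos hc, H c acc hacc]
      exact ih _ (fun x hx => pvGoA_mono d g c acc x (hacc x hx))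
    · rw [if_neg hc, if_neg hc]
      exact ih _ hacc

-- the same congruence for a plain fold of pvGoA
lemma foldl_goA_congr' (d : List (Int × String × List Int)) (f g : Nat) (base : List Int)
    (H : ∀ (c : Int) (a : List Int), (∀ x, x ∈ base → x ∈ a) → pvGoA d f c a = pvGoA d g c a) :
    ∀ (cs : List Int) (acc : List Int), (∀ x, x ∈ base → x ∈ acc) →
      cs.foldl (fun acc c => pvGoA d f c acc) acc = cs.foldl (fun acc c => pvGoA d g c acc) acc := by
  intro cs
  induction cs with
  | nil => intro acc _; rfl
  | cons c cs ih =>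
    intro acc hacc
    simp only [List.foldl_cons]
    rw [H c acc hacc]
    exact ih _ (fun x hx => pvGoA_mono d g c acc x (hacc x hx))

-- fuel adequacy for A's port: any two fuels ≥ pvNu lg + 2 give the same result
lemma pvGoA_adequate (d : List (Int × String × List Int)) :
    ∀ (m : Nat), ∀ (f g : Nat) (n : Int) (lg : List Int), pvNu d lg = m →
      m + 2 ≤ f → m + 2 ≤ g → pvGoA d f n lg = pvGoA d g n lg := by
  intro m
  induction m using Nat.strong_induction_on with
  | _ m ih =>
    intro f g n lg hm hf hg
    match f, g with
    | f + 1, g + 1 =>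
      rw [pvGoA_succ, pvGoA_succ]
      split
      · rfl
      · next hn =>
        match hv : pvLk d n with
        | none => rfl
        | some v =>
          obtain ⟨hk, _⟩ := pvLk_some_mem hv
          have hlt : pvNu d (lg ++ [n]) < m := hm ▸ pvNu_strict d hk hn
          refine foldl_goA_congr d f g (lg ++ [n]) v ?_ v.2 (lg ++ [n]) (fun x hx => hx)
          intro c a ha
          have hle : pvNu d a ≤ pvNu d (lg ++ [n]) := pvNu_mono d ha
          exact ih (pvNu d a) (by omega) f g c a rfl (by omega) (by omega)

-- the reversed push loop builds `filter ++ rest` (first neighbor on top)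
lemma rev_push_eq_filter (p : Int → Bool) :
    ∀ (cs : List Int) (st : List Int),
      cs.reverse.foldl (fun s c => if p c then c :: s else s) st = cs.filter p ++ st := by
  intro cs
  induction cs with
  | nil => intro st; rfl
  | cons a cs ih =>
    intro st
    simp only [List.reverse_cons, List.foldl_append, List.foldl_cons, List.foldl_nil, ih st,
      List.filter_cons]
    split <;> simp

-- a fold with the test inside is the fold of the filtered list
lemma foldl_if_eq_filter {α : Type} (p : Int → Bool) (g : α → Int → α) :
    ∀ (cs : List Int) (acc : α),
      cs.foldl (fun a c => if p c then g a c else a) acc = (cs.filter p).foldl g acc := by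
  intro cs
  induction cs with
  | nil => intro acc; rfl
  | cons c cs ih =>
    intro acc
    simp only [List.foldl_cons, List.filter_cons]
    split <;> simp [ih]

lemma mem_map_le_sum {d : List (Int × String × List Int)} {e : Int × String × List Int}
    (he : e ∈ d) : e.2.2.length ≤ (d.map (fun e => e.2.2.length)).sum := by
  induction d with
  | nil => cases he
  | cons a d ih =>
    rcases List.mem_cons.mp he with rfl | h
    · simp only [List.map_cons, List.sum_cons]; omega
    · have := ih h; simp only [List.map_cons, List.sum_cons]; omega

-- main simulation: the reference machine over a stack is the fold of the recursive DFS over it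
lemma pvGoM_eq_foldA (d : List (Int × String × List Int))
    (HW : ∀ e ∈ d, ∀ c ∈ e.2.2, c ∈ d.map (fun e => e.1)) :
    ∀ (f : Nat) (stack lg : List Int),
      (∀ x ∈ stack, x ∈ lg ∨ x ∈ d.map (fun e => e.1)) →
      stack.length + (pvNu d lg + 1) * ((d.map (fun e => e.2.2.length)).sum + 1) ≤ f →
      pvGoM d f stack lg = stack.foldl (fun acc c => pvGoA d (d.length + 2) c acc) lg := by
  intro f
  induction f with
  | zero =>
    intro stack lg _ hfuel
    match stack with
    | [] => rfl
    | n :: rest => simp only [List.length_cons] at hfuel; omega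
  | succ f ih =>
    intro stack lg hst hfuel
    match stack with
    | [] => rfl
    | n :: rest =>
      simp only [List.length_cons] at hfuel
      simp only [List.foldl_cons]
      rw [pvGoM_succ]
      by_cases hn : n ∈ lg
      · rw [if_pos hn, pvGoA_mem d _ n lg hn]
        exact ih rest lg (fun x hx => hst x (List.mem_cons_of_mem _ hx)) (by omega)
      · rw [if_neg hn]
        have hk : n ∈ d.map (fun e => e.1) := by
          rcases hst n List.mem_cons_self with h | h
          · exact absurd h hn
          · exact h
        obtain ⟨v, hv⟩ := pvLk_mem_some hk
        simp only [hv]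
        obtain ⟨_, e, he, hev⟩ := pvLk_some_mem hv
        set p : Int → Bool := fun c => decide (((pvLk d c).getD ("", [])).1 ≠ v.1) with hp
        have hrev : v.2.reverse.foldl
            (fun st c => if ((pvLk d c).getD ("", [])).1 ≠ v.1 then c :: st else st) rest
            = v.2.filter p ++ rest := by
          simpa [hp] using rev_push_eq_filter p v.2 rest
        rw [hrev]
        -- facts for the fuel bookkeeping
        have hnu : pvNu d (lg ++ [n]) < pvNu d lg := pvNu_strict d hk hn
        have hlen : (v.2.filter p).length ≤ (d.map (fun e => e.2.2.length)).sum := by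
          calc (v.2.filter p).length ≤ v.2.length := List.length_filter_le _ _
            _ = e.2.2.length := by rw [hev]
            _ ≤ _ := mem_map_le_sum he
        have hstack' : ∀ x ∈ v.2.filter p ++ rest, x ∈ lg ++ [n] ∨ x ∈ d.map (fun e => e.1) := by
          intro x hx
          rcases List.mem_append.mp hx with hx | hx
          · refine Or.inr ?_
            have hxv : x ∈ v.2 := List.mem_of_mem_filter hx
            exact HW e he x (hev ▸ hxv)
          · rcases hst x (List.mem_cons_of_mem _ hx) with h | h
            · exact Or.inl (by simp [h])
            · exact Or.inr h
        have hIH := ih (v.2.filter p ++ rest) (lg ++ [n]) hstack'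
          (by
            simp only [List.length_append]
            have hmul : (pvNu d (lg ++ [n]) + 1) * ((d.map (fun e => e.2.2.length)).sum + 1)
                ≤ pvNu d lg * ((d.map (fun e => e.2.2.length)).sum + 1) :=
              Nat.mul_le_mul_right _ (by omega)
            have hx : (pvNu d lg + 1) * ((d.map (fun e => e.2.2.length)).sum + 1)
                = pvNu d lg * ((d.map (fun e => e.2.2.length)).sum + 1)
                  + ((d.map (fun e => e.2.2.length)).sum + 1) := by ring
            omega)
        rw [hIH, List.foldl_append]
        congr 1
        -- unfolding A's step at n equals folding pvGoA with full fuel over the filtered children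
        have e1 : pvGoA d (d.length + 2) n lg = pvGoA d ((d.length + 1) + 1) n lg := rfl
        have hAn : pvGoA d (d.length + 2) n lg
            = (v.2.filter p).foldl (fun acc c => pvGoA d (d.length + 1) c acc) (lg ++ [n]) := by
          rw [e1, pvGoA_succ, if_neg hn]
          simp only [hv]
          have := foldl_if_eq_filter p (fun a c => pvGoA d (d.length + 1) c a) v.2 (lg ++ [n])
          simp only [hp, decide_eq_true_eq] at this
          exact this
        rw [hAn]
        -- replace the fuel d.length+1 by d.length+2 using adequacy
        refine foldl_goA_congr' d (d.length + 2) (d.length + 1) (lg ++ [n]) ?_ _ _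
          (fun x hx => hx)
        intro c a ha
        have h1 : pvNu d a ≤ pvNu d (lg ++ [n]) := pvNu_mono d ha
        have h2 : pvNu d lg ≤ d.length := pvNu_le d lg
        exact pvGoA_adequate d (pvNu d a) (d.length + 2) (d.length + 1) c a rfl
          (by omega) (by omega)

-- B equals the reference machine on its actual initial state
lemma find_line_alt_eq_pvGoM (n : Int) (d : List (Int × String × List Int)) (lg : List Int) :
    find_line_alt n d lg
      = pvGoM d (1 + (d.length + 1) * ((d.map (fun e => e.2.2.length)).sum + 1)) [n] lg := by
  unfold find_line_alt
  have h := pvStepB_eq_pvGoM d (1 + (d.length + 1) * ((d.map (fun e => e.2.2.length)).sum + 1))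
    [n] (PySem.Set.ofList lg) lg []
    (by intro x; rw [PySem.Set.mem_ofList]; simp)
  simpa using h

-- ===== VERDICT (by name: the statement is the Claim_ definition above) =====
theorem find_line_spec : Claim_equal_find_line := by
  intro n d lg _ hpre
  unfold Spec_find_line find_line
  rw [find_line_alt_eq_pvGoM]
  rcases hpre with hn | ⟨hk, HW⟩
  · -- start already visited: both return lg
    obtain ⟨f, hf⟩ : ∃ f, 1 + (d.length + 1) * ((d.map (fun e => e.2.2.length)).sum + 1) = f + 1 :=
      ⟨(d.length + 1) * ((d.map (fun e => e.2.2.length)).sum + 1), by omega⟩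
    rw [pvGoA_mem d _ n lg hn, hf, pvGoM_succ, if_pos hn, pvGoM_nil]
  · have hnu : pvNu d lg ≤ pvNu d lg := le_refl _
    have hB := pvGoM_eq_foldA d HW
      (1 + (d.length + 1) * ((d.map (fun e => e.2.2.length)).sum + 1)) [n] lg
      (fun x hx => by simp only [List.mem_singleton] at hx; subst hx; exact Or.inr hk)
      (by
        simp only [List.length_singleton]
        have h2 : pvNu d lg ≤ d.length := pvNu_le d lg
        have hmul : (pvNu d lg + 1) * ((d.map (fun e => e.2.2.length)).sum + 1)
            ≤ (d.length + 1) * ((d.map (fun e => e.2.2.length)).sum + 1) :=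
          Nat.mul_le_mul_right _ (by omega)
        omega)
    rw [hB]
    simp [List.foldl_cons]
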